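-- pv_equiv track=rewrite | github.com/psryland/rylogic_code | projects/rylogic/py-rylogic/rylogic/ldraw/ldraw.py | FormatScript
-- ===== SOURCE A (Python) =====
-- def FormatScript(s: str, indent_str: str = '\t') -> str:
-- 	out = []
-- 	indent = 0
-- 	for c in s:
-- 		if c == '{':
-- 			indent += 1
-- 			out.append(c)
-- 			out.append('\n')
-- 			out.append(indent * indent_str)
-- 		elif c == '}':
-- 			indent -= 1
-- 			out.append('\n')
-- 			out.append(indent * indent_str)
-- 			out.append(c)
-- 			out.append('\n')
-- 			out.append(indent * indent_str)
-- 		else: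
-- 			out.append(c)
--
-- 	return ''.join(out)
-- ===== SOURCE B (Python) =====
-- def FormatScript(s: str, indent_str: str = '\t') -> str:
-- 	# pass 1: split s into alternating text segments and single-brace tokens
-- 	tokens = []
-- 	seg = []
-- 	for c in s:
-- 		if c == '{' or c == '}':
-- 			tokens.append(''.join(seg))
-- 			tokens.append(c)
-- 			seg = []
-- 		else:
-- 			seg.append(c)
-- 	tokens.append(''.join(seg))
-- 	# pass 2: emit whole pieces per token, tracking the indent level
-- 	out = []
-- 	indent = 0
-- 	for tok in tokens:
-- 		if tok == '{':
-- 			indent += 1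
-- 			out.append('{\n' + indent * indent_str)
-- 		elif tok == '}':
-- 			indent -= 1
-- 			out.append('\n' + indent * indent_str + '}\n' + indent * indent_str)
-- 		else:
-- 			out.append(tok)
-- 	return ''.join(out)
-- ===== Notes on version B (the rewrite author's own statement) =====
-- stated objective: alternative
-- what changed: A's single fused per-character loop (five separate appends per brace) is replaced by a two-pass scheme: the string is first split into a token list of text segments and single-brace tokens, then a loop over tokens emits each segment verbatim and one whole pre-concatenated piece per brace.
import Mathlib
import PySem

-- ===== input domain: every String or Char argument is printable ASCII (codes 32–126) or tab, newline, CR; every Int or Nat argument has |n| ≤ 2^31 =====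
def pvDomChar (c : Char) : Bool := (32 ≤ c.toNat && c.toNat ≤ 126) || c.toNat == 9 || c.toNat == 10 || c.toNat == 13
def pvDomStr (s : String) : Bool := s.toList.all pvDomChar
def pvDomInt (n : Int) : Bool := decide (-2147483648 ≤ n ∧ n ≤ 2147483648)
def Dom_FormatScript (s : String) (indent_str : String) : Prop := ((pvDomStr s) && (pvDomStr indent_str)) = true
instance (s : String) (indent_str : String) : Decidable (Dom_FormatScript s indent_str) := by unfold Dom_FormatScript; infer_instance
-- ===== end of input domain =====

-- B replaces A's fused per-character loop with a two-pass scheme (tokenize into text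
-- segments and brace tokens, then emit one whole piece per token): an alternative
-- structure with the same output and cost.

-- ===== PORT A =====
-- one repetition helper shared by both ports: Python's `n * t` on strings (empty for n <= 0); exact
def pyRep (n : Int) (t : List Char) : List Char := (List.replicate n.toNat t).flatten

-- A's loop body, named for the proofs; out accumulated as List Char (''.join of A's appends)
def pvStepA (t : List Char) (st : List Char × Int) (c : Char) : List Char × Int :=
  if c = '{' then
    (st.1 ++ [c] ++ ['\n'] ++ pyRep (st.2 + 1) t, st.2 + 1)
  else if c = '}' then
    (st.1 ++ ['\n'] ++ pyRep (st.2 - 1) t ++ [c] ++ ['\n'] ++ pyRep (st.2 - 1) t, st.2 - 1)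
  else (st.1 ++ [c], st.2)

def FormatScript (s : String) (indent_str : String) : String :=
  String.mk (s.toList.foldl (pvStepA indent_str.toList) ([], 0)).1

-- ===== PORT B =====
-- pass 1 step: split into text segments and single-brace tokens
def pvTok1 (st : List (List Char) × List Char) (c : Char) : List (List Char) × List Char :=
  if c = '{' ∨ c = '}' then (st.1 ++ [st.2, [c]], []) else (st.1, st.2 ++ [c])

-- pass 2 step: emit one whole piece per token
def pvStepB (t : List Char) (st : List Char × Int) (tok : List Char) : List Char × Int :=
  if tok = ['{'] then (st.1 ++ '{' :: '\n' :: pyRep (st.2 + 1) t, st.2 + 1)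
  else if tok = ['}'] then
    (st.1 ++ '\n' :: (pyRep (st.2 - 1) t ++ '}' :: '\n' :: pyRep (st.2 - 1) t), st.2 - 1)
  else (st.1 ++ tok, st.2)

def FormatScript_alt (s : String) (indent_str : String) : String :=
  let p := s.toList.foldl pvTok1 ([], [])
  String.mk ((p.1 ++ [p.2]).foldl (pvStepB indent_str.toList) ([], 0)).1

-- ===== PRECONDITION & SPEC =====
def Spec_FormatScript (s : String) (indent_str : String) (out : String) : Prop := out = FormatScript_alt s indent_str
instance (s : String) (indent_str : String) (out : String) : Decidable (Spec_FormatScript s indent_str out) := by unfold Spec_FormatScript; infer_instance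

-- ===== CLAIM (what is proved, stated in full; the proofs are below) =====
def Claim_equal_FormatScript : Prop := ∀ (s : String) (indent_str : String), Dom_FormatScript s indent_str → Spec_FormatScript s indent_str (FormatScript s indent_str)

-- ===== LEMMAS AND PROOFS =====

-- pass 1 only ever appends to the token list: the already-collected prefix factors out
theorem tok1_prefix (cs : List Char) (ts : List (List Char)) (sg : List Char) :
    List.foldl pvTok1 (ts, sg) cs
      = (ts ++ (List.foldl pvTok1 ([], sg) cs).1, (List.foldl pvTok1 ([], sg) cs).2) := by
  induction cs generalizing ts sg with
  | nil => simp
  | cons c rest ih =>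
    by_cases hc : c = '{' ∨ c = '}'
    · simp only [List.foldl_cons, pvTok1, if_pos hc, List.nil_append]
      rw [ih (ts ++ [sg, [c]]) [], ih [sg, [c]] []]
      simp
    · simp only [List.foldl_cons, pvTok1, if_neg hc]
      exact ih ts (sg ++ [c])

-- main invariant: running pass 2 over the tokens of cs (with pending segment sg)
-- equals running A's char loop over cs from a state whose output already holds sg
theorem key (t : List Char) (cs : List Char) (sg out : List Char) (ind : Int)
    (h1 : '{' ∉ sg) (h2 : '}' ∉ sg) :
    List.foldl (pvStepB t) (out, ind)
        ((List.foldl pvTok1 ([], sg) cs).1 ++ [(List.foldl pvTok1 ([], sg) cs).2])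
      = List.foldl (pvStepA t) (out ++ sg, ind) cs := by
  induction cs generalizing sg out ind with
  | nil =>
    have hb1 : sg ≠ ['{'] := by rintro rfl; simp at h1
    have hb2 : sg ≠ ['}'] := by rintro rfl; simp at h2
    simp [pvStepB, hb1, hb2]
  | cons c rest ih =>
    by_cases hc : c = '{' ∨ c = '}'
    · have hb1 : sg ≠ ['{'] := by rintro rfl; simp at h1
      have hb2 : sg ≠ ['}'] := by rintro rfl; simp at h2
      simp only [List.foldl_cons, pvTok1, if_pos hc, List.nil_append]
      rw [tok1_prefix rest [sg, [c]] []]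
      rcases hc with hc | hc <;> subst hc
      · have := ih ([] : List Char) (out ++ sg ++ '{' :: '\n' :: pyRep (ind + 1) t) (ind + 1)
          (by simp) (by simp)
        simp only [List.append_nil] at this
        simp only [List.cons_append, List.nil_append, List.foldl_cons]
        rw [show pvStepB t (out, ind) sg = (out ++ sg, ind) by simp [pvStepB, hb1, hb2]]
        rw [show pvStepB t (out ++ sg, ind) ['{']
              = (out ++ sg ++ '{' :: '\n' :: pyRep (ind + 1) t, ind + 1) by simp [pvStepB]]
        rw [this]
        simp [pvStepA]
      · have := ih ([] : List Char)
          (out ++ sg ++ '\n' :: (pyRep (ind - 1) t ++ '}' :: '\n' :: pyRep (ind - 1) t)) (ind - 1)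
          (by simp) (by simp)
        simp only [List.append_nil] at this
        simp only [List.cons_append, List.nil_append, List.foldl_cons]
        rw [show pvStepB t (out, ind) sg = (out ++ sg, ind) by simp [pvStepB, hb1, hb2]]
        rw [show pvStepB t (out ++ sg, ind) ['}']
              = (out ++ sg ++ '\n' :: (pyRep (ind - 1) t ++ '}' :: '\n' :: pyRep (ind - 1) t), ind - 1) by
            simp [pvStepB]]
        rw [this]
        simp [pvStepA]
    · push_neg at hc
      simp only [List.foldl_cons, pvTok1, if_neg (by tauto : ¬(c = '{' ∨ c = '}'))]
      rw [ih (sg ++ [c]) out ind (by simp [h1]; exact fun h => hc.1 h.symm)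
            (by simp [h2]; exact fun h => hc.2 h.symm)]
      simp [pvStepA, hc.1, hc.2]

-- ===== VERDICT (by name: the statement is the Claim_ definition above) =====
theorem FormatScript_spec : Claim_equal_FormatScript := by
  intro s indent_str _
  unfold Spec_FormatScript FormatScript FormatScript_alt
  show String.mk (List.foldl (pvStepA indent_str.toList) ([], 0) s.toList).1
      = String.mk (List.foldl (pvStepB indent_str.toList) ([], 0)
          ((List.foldl pvTok1 ([], []) s.toList).1 ++ [(List.foldl pvTok1 ([], []) s.toList).2])).1
  rw [key indent_str.toList s.toList [] [] 0 (by simp) (by simp)]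
  simp
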